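-- pv_equiv track=rewrite | github.com/kevinhust/AIG200Capstone | src/data_rag/met_mapping.py | get_primary_muscles
-- ===== SOURCE A (Python) =====
-- from typing import Dict, List, Optional, Tuple
--
-- MUSCLE_GROUPS: Dict[str, str] = {
--     # Chest
--     "pectoralis": "chest",
--     "chest": "chest",
--     "pec": "chest",
--
--     # Back
--     "latissimus": "back",
--     "trapezius": "back",
--     "rhomboid": "back",
--     "back": "back",
--
--     # Shoulders
--     "deltoid": "shoulders",
--     "shoulder": "shoulders",
--
--     # Arms
--     "bicep": "arms",
--     "tricep": "arms",
--     "brachialis": "arms",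
--     "forearm": "arms",
--
--     # Core
--     "abdominis": "core",
--     "oblique": "core",
--     "core": "core",
--     "abs": "core",
--
--     # Legs
--     "quadricep": "legs",
--     "quad": "legs",
--     "hamstring": "legs",
--     "glute": "legs",
--     "gluteus": "legs",
--     "calf": "legs",
--     "gastrocnemius": "legs",
--     "soleus": "legs",
--     "leg": "legs",
--     "thigh": "legs",
--
--     # Full body
--     "full body": "full_body",
--     "total body": "full_body",
-- }
--
-- def get_primary_muscles(tags: List[str], category: str = "") -> List[str]:
--     """
--     Extract primary muscle groups from tags and category.
--
--     Args:
--         tags: List of muscle/equipment tags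
--         category: Exercise category
--
--     Returns:
--         List of primary muscle groups
--     """
--     muscles = []
--     all_text = f"{category.lower()} {' '.join(str(t).lower() for t in tags)}"
--
--     for keyword, muscle in MUSCLE_GROUPS.items():
--         if keyword in all_text and muscle not in muscles:
--             muscles.append(muscle)
--
--     # Category fallback
--     if not muscles and category:
--         cat_lower = category.lower()
--         if cat_lower in ["chest", "back", "shoulders", "arms", "legs", "core", "abs"]:
--             muscles.append(cat_lower)
--
--     return muscles if muscles else ["general"]
-- ===== SOURCE B (Python) =====
-- MUSCLE_GROUPS = {
--     "pectoralis": "chest", "chest": "chest", "pec": "chest",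
--     "latissimus": "back", "trapezius": "back", "rhomboid": "back", "back": "back",
--     "deltoid": "shoulders", "shoulder": "shoulders",
--     "bicep": "arms", "tricep": "arms", "brachialis": "arms", "forearm": "arms",
--     "abdominis": "core", "oblique": "core", "core": "core", "abs": "core",
--     "quadricep": "legs", "quad": "legs", "hamstring": "legs", "glute": "legs",
--     "gluteus": "legs", "calf": "legs", "gastrocnemius": "legs", "soleus": "legs",
--     "leg": "legs", "thigh": "legs",
--     "full body": "full_body", "total body": "full_body",
-- }
--
-- _GROUP_ORDER = ["chest", "back", "shoulders", "arms", "core", "legs", "full_body"]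
--
-- # index the keywords by their first character, built once at import time
-- _BY_FIRST = {}
-- for _kw, _grp in MUSCLE_GROUPS.items():
--     _BY_FIRST.setdefault(_kw[0], []).append((_kw, _grp))
--
-- def get_primary_muscles(tags, category=""):
--     all_text = f"{category.lower()} {' '.join(str(t).lower() for t in tags)}"
--     # single scan over the text: at each position, only try keywords that
--     # start with the character found there
--     found = set()
--     for i, ch in enumerate(all_text):
--         for kw, grp in _BY_FIRST.get(ch, ()):
--             if all_text.startswith(kw, i):
--                 found.add(grp)
--     muscles = [g for g in _GROUP_ORDER if g in found]
--     if not muscles and category: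
--         cat_lower = category.lower()
--         if cat_lower in ["chest", "back", "shoulders", "arms", "legs", "core", "abs"]:
--             muscles.append(cat_lower)
--     return muscles if muscles else ["general"]
-- ===== Notes on version B (the rewrite author's own statement) =====
-- stated objective: alternative
-- what changed: Instead of testing each keyword with 'kw in all_text', B scans the text once position by position, using a first-character index of the keywords to try only plausible anchors, collects matched groups in a set, and emits them in a second pass in the fixed group order.
import Mathlib
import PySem

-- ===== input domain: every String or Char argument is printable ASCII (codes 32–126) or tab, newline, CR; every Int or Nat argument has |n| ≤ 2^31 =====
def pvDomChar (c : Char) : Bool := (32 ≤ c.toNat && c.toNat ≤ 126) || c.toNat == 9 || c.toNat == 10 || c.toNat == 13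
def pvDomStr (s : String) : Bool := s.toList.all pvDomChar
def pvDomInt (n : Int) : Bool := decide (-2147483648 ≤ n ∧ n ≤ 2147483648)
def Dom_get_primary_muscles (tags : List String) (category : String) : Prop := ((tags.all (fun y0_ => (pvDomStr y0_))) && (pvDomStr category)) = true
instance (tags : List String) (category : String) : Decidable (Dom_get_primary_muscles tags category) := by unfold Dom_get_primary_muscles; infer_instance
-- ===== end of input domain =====

-- B replaces A's keyword-by-keyword substring scan with a single left-to-right scan over the
-- text, trying at each position only the keywords indexed by their first character, collecting
-- matched groups in a set and emitting them in the fixed group order (objective: alternative).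


-- ===== PORT A =====
-- MUSCLE_GROUPS.items() in insertion order
def pvMuscleItems : List (String × String) :=
  [("pectoralis", "chest"), ("chest", "chest"), ("pec", "chest"),
   ("latissimus", "back"), ("trapezius", "back"), ("rhomboid", "back"), ("back", "back"),
   ("deltoid", "shoulders"), ("shoulder", "shoulders"),
   ("bicep", "arms"), ("tricep", "arms"), ("brachialis", "arms"), ("forearm", "arms"),
   ("abdominis", "core"), ("oblique", "core"), ("core", "core"), ("abs", "core"),
   ("quadricep", "legs"), ("quad", "legs"), ("hamstring", "legs"), ("glute", "legs"),
   ("gluteus", "legs"), ("calf", "legs"), ("gastrocnemius", "legs"), ("soleus", "legs"),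
   ("leg", "legs"), ("thigh", "legs"),
   ("full body", "full_body"), ("total body", "full_body")]

-- A's loop body on one (keyword, muscle) pair of MUSCLE_GROUPS.items()
def pvStep (t : String) (ms : List String) (p : String × String) : List String :=
  if PySem.Str.isIn p.1 t && !(ms.contains p.2) then ms ++ [p.2] else ms

def get_primary_muscles (tags : List String) (category : String) : List String :=
  let all_text := PySem.Str.join " " [PySem.Str.lower category,
                    PySem.Str.join " " (tags.map (fun t => PySem.Str.lower t))]
  let muscles := pvMuscleItems.foldl (pvStep all_text) []
  let muscles :=
    if muscles = [] ∧ category ≠ "" then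
      let cat_lower := PySem.Str.lower category
      if ["chest", "back", "shoulders", "arms", "legs", "core", "abs"].contains cat_lower then
        muscles ++ [cat_lower]
      else muscles
    else muscles
  if muscles = [] then ["general"] else muscles

-- ===== PORT B =====
def pvGroupOrder : List String :=
  ["chest", "back", "shoulders", "arms", "core", "legs", "full_body"]

-- _BY_FIRST: MUSCLE_GROUPS.items() indexed by kw[0] (every keyword is nonempty, so
-- kw[0] = kw.toList.headD ' ' exactly)
def pvByFirst : PySem.Dict Char (List (String × String)) :=
  pvMuscleItems.foldl
    (fun d p => d.insert (p.1.toList.headD ' ') ((d.getD (p.1.toList.headD ' ') []) ++ [p]))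
    PySem.Dict.empty

def get_primary_muscles_alt (tags : List String) (category : String) : List String :=
  let all_text := PySem.Str.join " " [PySem.Str.lower category,
                    PySem.Str.join " " (tags.map (fun t => PySem.Str.lower t))]
  -- for i, ch in enumerate(all_text): for kw, grp in _BY_FIRST.get(ch, ()): …
  let found := (PySem.List.enumerate all_text.toList).foldl
    (fun s ic =>
      (pvByFirst.getD ic.2 []).foldl
        (fun s p =>
          -- all_text.startswith(kw, i): exact, since i is an enumerate index (0 ≤ i < len)
          if PySem.Chars.startswith (all_text.toList.drop ic.1.toNat) p.1.toList
          then PySem.Set.add s p.2 else s) s)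
    ([] : PySem.Set String)
  let muscles := pvGroupOrder.filter (fun g => PySem.Set.contains found g)
  let muscles :=
    if muscles = [] ∧ category ≠ "" then
      let cat_lower := PySem.Str.lower category
      if ["chest", "back", "shoulders", "arms", "legs", "core", "abs"].contains cat_lower then
        muscles ++ [cat_lower]
      else muscles
    else muscles
  if muscles = [] then ["general"] else muscles

-- ===== PRECONDITION & SPEC =====
def Spec_get_primary_muscles (tags : List String) (category : String) (out : List String) : Prop := out = get_primary_muscles_alt tags category
instance (tags : List String) (category : String) (out : List String) : Decidable (Spec_get_primary_muscles tags category out) := by unfold Spec_get_primary_muscles; infer_instance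

-- ===== CLAIM (what is proved, stated in full; the proofs are below) =====
def Claim_equal_get_primary_muscles : Prop := ∀ (tags : List String) (category : String), Dom_get_primary_muscles tags category → Spec_get_primary_muscles tags category (get_primary_muscles tags category)

-- ===== LEMMAS AND PROOFS =====

-- the muscle→keywords view of MUSCLE_GROUPS used by the proofs (NOT by either port)
def pvMuscleKeywords : List (String × List String) :=
  [("chest", ["pectoralis", "chest", "pec"]),
   ("back", ["latissimus", "trapezius", "rhomboid", "back"]),
   ("shoulders", ["deltoid", "shoulder"]),
   ("arms", ["bicep", "tricep", "brachialis", "forearm"]),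
   ("core", ["abdominis", "oblique", "core", "abs"]),
   ("legs", ["quadricep", "quad", "hamstring", "glute", "gluteus", "calf",
             "gastrocnemius", "soleus", "leg", "thigh"]),
   ("full_body", ["full body", "total body"])]

-- ----- A side: A's fold appends each group label once, in group order -----

-- once the muscle label is already present, A's loop over its keywords does nothing
lemma pvStep_fold_mem (t m : String) (kws : List String) (acc : List String) (h : m ∈ acc) :
    (kws.map (fun kw => (kw, m))).foldl (pvStep t) acc = acc := by
  induction kws with
  | nil => rfl
  | cons kw kws ih =>
    simp only [List.map_cons, List.foldl_cons, pvStep]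
    rw [if_neg (by simp [h])]
    exact ih

-- A's loop over one muscle's contiguous keyword block appends the label iff any keyword matches
lemma pvStep_fold_group (t m : String) (kws : List String) (acc : List String) (h : m ∉ acc) :
    (kws.map (fun kw => (kw, m))).foldl (pvStep t) acc
      = acc ++ (if kws.any (fun kw => PySem.Str.isIn kw t) then [m] else []) := by
  induction kws generalizing acc with
  | nil => simp
  | cons kw kws ih =>
    simp only [List.map_cons, List.foldl_cons, pvStep]
    by_cases hin : PySem.Chars.isIn kw.toList t.toList = true
    · rw [if_pos (by simp [hin, h]), pvStep_fold_mem t m kws (acc ++ [m]) (by simp)]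
      simp [List.any_cons, hin]
    · rw [if_neg (by simp [hin]), ih acc h]
      rw [Bool.not_eq_true] at hin
      simp [List.any_cons, hin]

-- the grouped view of A's whole loop
lemma pvStep_fold_groups (t : String) (gs : List (String × List String)) (acc : List String)
    (h : ∀ g ∈ gs, g.1 ∉ acc) (hd : (gs.map (fun g => g.1)).Nodup) :
    (gs.flatMap (fun g => g.2.map (fun kw => (kw, g.1)))).foldl (pvStep t) acc
      = acc ++ (gs.filter (fun g => g.2.any (fun kw => PySem.Str.isIn kw t))).map (fun g => g.1) := by
  induction gs generalizing acc with
  | nil => simp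
  | cons g gs ih =>
    simp only [List.flatMap_cons, List.foldl_append]
    rw [pvStep_fold_group t g.1 g.2 acc (h g (by simp))]
    simp only [List.map_cons, List.nodup_cons] at hd
    by_cases hb : (g.2.any fun kw => PySem.Str.isIn kw t) = true
    · have h' : ∀ g' ∈ gs, g'.1 ∉ acc ++ [g.1] := by
        intro g' hg'
        simp only [List.mem_append, List.mem_singleton]
        rintro (h1 | h1)
        · exact h g' (List.mem_cons_of_mem _ hg') h1
        · exact hd.1 (h1 ▸ List.mem_map_of_mem hg')
      have hbC := hb
      simp only [PySem.Str.isIn_eq] at hbC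
      rw [if_pos hb, ih (acc ++ [g.1]) h' hd.2]
      simp [hbC, List.append_assoc]
    · rw [Bool.not_eq_true] at hb
      have hbC := hb
      simp only [PySem.Str.isIn_eq] at hbC
      rw [if_neg (by simp [hbC]), List.append_nil,
        ih acc (fun g' hg' => h g' (List.mem_cons_of_mem _ hg')) hd.2]
      simp [hbC]

lemma pvItems_eq_flat :
    pvMuscleItems = pvMuscleKeywords.flatMap (fun g => g.2.map (fun kw => (kw, g.1))) := by
  rfl

lemma pv_A_muscles (t : String) :
    pvMuscleItems.foldl (pvStep t) []
      = (pvMuscleKeywords.filter (fun g => g.2.any (fun kw => PySem.Str.isIn kw t))).map (fun g => g.1) := by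
  rw [pvItems_eq_flat, pvStep_fold_groups t pvMuscleKeywords [] (by simp) (by decide)]
  simp

-- ----- B side: what the scan's set contains -----

-- membership in a first-component-indexed grouping dict
lemma mem_groupFold {α κ : Type} [BEq κ] [LawfulBEq κ] [DecidableEq κ] (f : α → κ)
    (l : List α) (d : PySem.Dict κ (List α)) (k : κ) (x : α) :
    x ∈ (l.foldl (fun d p => d.insert (f p) ((d.getD (f p) []) ++ [p])) d).getD k [] ↔
      x ∈ d.getD k [] ∨ (x ∈ l ∧ f x = k) := by
  induction l generalizing d with
  | nil => simp
  | cons p l ih =>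
    simp only [List.foldl_cons, ih, PySem.Dict.getD_insert]
    by_cases hk : k = f p
    · subst hk
      rw [if_pos rfl]
      simp only [List.mem_append, List.mem_cons, List.not_mem_nil, or_false]
      constructor
      · rintro ((h | h) | ⟨h1, h2⟩)
        · exact Or.inl h
        · exact Or.inr ⟨Or.inl h, by rw [h]⟩
        · exact Or.inr ⟨Or.inr h1, h2⟩
      · rintro (h | ⟨(h1 | h1), h2⟩)
        · exact Or.inl (Or.inl h)
        · exact Or.inl (Or.inr h1)
        · exact Or.inr ⟨h1, h2⟩
    · rw [if_neg hk]
      simp only [List.mem_cons]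
      constructor
      · rintro (h | ⟨h1, h2⟩)
        · exact Or.inl h
        · exact Or.inr ⟨Or.inr h1, h2⟩
      · rintro (h | ⟨(h1 | h1), h2⟩)
        · exact Or.inl h
        · exact absurd h2 (by rw [h1]; exact fun hh => hk hh.symm)
        · exact Or.inr ⟨h1, h2⟩

lemma mem_byFirst (k : Char) (x : String × String) :
    x ∈ pvByFirst.getD k [] ↔ x ∈ pvMuscleItems ∧ x.1.toList.headD ' ' = k := by
  have := mem_groupFold (fun p : String × String => p.1.toList.headD ' ')
    pvMuscleItems (PySem.Dict.empty : PySem.Dict Char (List (String × String))) k x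
  simpa [pvByFirst, PySem.Dict.getD, PySem.Dict.get?, PySem.Dict.empty] using this

-- membership after B's inner loop (over the keywords indexed at one position)
lemma mem_innerFold (t : List Char) (i : Nat) (lst : List (String × String))
    (s : PySem.Set String) (g : String) :
    g ∈ lst.foldl (fun s p =>
        if PySem.Chars.startswith (t.drop i) p.1.toList then PySem.Set.add s p.2 else s) s ↔
      g ∈ s ∨ ∃ p ∈ lst, PySem.Chars.startswith (t.drop i) p.1.toList = true ∧ p.2 = g := by
  induction lst generalizing s with
  | nil => simp
  | cons p lst ih =>
    simp only [List.foldl_cons]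
    by_cases hp : PySem.Chars.startswith (t.drop i) p.1.toList = true
    · rw [if_pos hp, ih]
      simp only [PySem.Set.mem_add, List.mem_cons]
      constructor
      · rintro ((h | h) | ⟨q, hq1, hq2⟩)
        · exact Or.inl h
        · exact Or.inr ⟨p, Or.inl rfl, hp, h.symm⟩
        · exact Or.inr ⟨q, Or.inr hq1, hq2⟩
      · rintro (h | ⟨q, (hq1 | hq1), hq2, hq3⟩)
        · exact Or.inl (Or.inl h)
        · exact Or.inl (Or.inr (by rw [← hq3, hq1]))
        · exact Or.inr ⟨q, hq1, hq2, hq3⟩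
    · rw [if_neg hp, ih]
      constructor
      · rintro (h | ⟨q, hq1, hq2⟩)
        · exact Or.inl h
        · exact Or.inr ⟨q, List.mem_cons_of_mem _ hq1, hq2⟩
      · rintro (h | ⟨q, hq1, hq2, hq3⟩)
        · exact Or.inl h
        · rcases List.mem_cons.mp hq1 with h1 | h1
          · exact absurd (h1 ▸ hq2) hp
          · exact Or.inr ⟨q, h1, hq2, hq3⟩

-- membership after B's outer loop (over the enumerated positions)
lemma mem_outerFold (t : List Char) (l : List (Int × Char)) (s : PySem.Set String) (g : String) :
    g ∈ l.foldl (fun s ic =>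
        (pvByFirst.getD ic.2 []).foldl (fun s p =>
          if PySem.Chars.startswith (t.drop ic.1.toNat) p.1.toList
          then PySem.Set.add s p.2 else s) s) s ↔
      g ∈ s ∨ ∃ ic ∈ l, ∃ p ∈ pvByFirst.getD ic.2 [],
        PySem.Chars.startswith (t.drop ic.1.toNat) p.1.toList = true ∧ p.2 = g := by
  induction l generalizing s with
  | nil => simp
  | cons ic l ih =>
    simp only [List.foldl_cons, ih, mem_innerFold]
    constructor
    · rintro ((h | ⟨p, hp1, hp2, hp3⟩) | ⟨jc, hj1, hrest⟩)
      · exact Or.inl h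
      · exact Or.inr ⟨ic, List.mem_cons_self .., p, hp1, hp2, hp3⟩
      · exact Or.inr ⟨jc, List.mem_cons_of_mem _ hj1, hrest⟩
    · rintro (h | ⟨jc, hj1, hrest⟩)
      · exact Or.inl (Or.inl h)
      · rcases List.mem_cons.mp hj1 with h1 | h1
        · exact Or.inl (Or.inr (h1 ▸ hrest))
        · exact Or.inr ⟨jc, h1, hrest⟩

lemma pvKw_ne_nil : ∀ p ∈ pvMuscleItems, p.1.toList ≠ [] := by decide

-- the set built by B's scan holds exactly the groups having a matching keyword
lemma mem_found (t : List Char) (g : String) :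
    g ∈ (PySem.List.enumerate t).foldl
        (fun s ic =>
          (pvByFirst.getD ic.2 []).foldl (fun s p =>
            if PySem.Chars.startswith (t.drop ic.1.toNat) p.1.toList
            then PySem.Set.add s p.2 else s) s) ([] : PySem.Set String) ↔
      ∃ kw : String, (kw, g) ∈ pvMuscleItems ∧ PySem.Chars.isIn kw.toList t = true := by
  rw [mem_outerFold]
  simp only [List.not_mem_nil, false_or]
  constructor
  · rintro ⟨ic, hic, p, hp, hsw, hpg⟩
    rcases (PySem.List.mem_enumerate_iff t 0 ic).mp hic with ⟨k, hk, rfl⟩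
    have hdrop : ((0 : Int) + (k : Int)).toNat = k := by omega
    rw [hdrop] at hsw
    have hpre := (PySem.Chars.startswith_iff _ _).mp hsw
    have hmb := (mem_byFirst _ p).mp hp
    refine ⟨p.1, ?_, (PySem.Chars.exists_prefix_drop_iff_isIn p.1.toList t).mp ⟨k, hpre⟩⟩
    rw [← hpg]
    exact hmb.1
  · rintro ⟨kw, hkw, hin⟩
    rcases (PySem.Chars.exists_prefix_drop_iff_isIn kw.toList t).mpr hin with ⟨j, hpre⟩
    have hne : kw.toList ≠ [] := pvKw_ne_nil (kw, g) hkw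
    have hj : j < t.length := by
      by_contra hge
      rw [List.drop_eq_nil_iff.mpr (by omega)] at hpre
      exact hne (List.prefix_nil.mp hpre)
    have hdropc : t.drop j = t[j] :: t.drop (j + 1) := List.drop_eq_getElem_cons hj
    obtain ⟨c, rest, hkwc⟩ : ∃ c rest, kw.toList = c :: rest := by
      cases h : kw.toList with
      | nil => exact absurd h hne
      | cons c rest => exact ⟨c, rest, rfl⟩
    have hc : c = t[j] := by
      rcases hpre with ⟨tail, htail⟩
      rw [hkwc, hdropc] at htail
      have h2 : c :: (rest ++ tail) = t[j] :: t.drop (j + 1) := by simpa using htail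
      exact (List.cons_eq_cons.mp h2).1
    refine ⟨((0 : Int) + (j : Int), t[j]), (PySem.List.mem_enumerate_iff t 0 _).mpr ⟨j, hj, rfl⟩,
      (kw, g), (mem_byFirst t[j] (kw, g)).mpr ⟨hkw, by rw [hkwc]; simpa using hc⟩, ?_, rfl⟩
    have hdrop : ((0 : Int) + (j : Int)).toNat = j := by omega
    rw [hdrop]
    exact (PySem.Chars.startswith_iff _ _).mpr hpre

lemma pvGroupOrder_eq : pvGroupOrder = pvMuscleKeywords.map (fun g => g.1) := by rfl

lemma pvFst_inj : ∀ g1 ∈ pvMuscleKeywords, ∀ g2 ∈ pvMuscleKeywords, g1.1 = g2.1 → g1 = g2 := by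
  decide

-- B's ordering pass produces exactly A's fold result
lemma pv_B_muscles (s : String) :
    pvGroupOrder.filter (fun g => PySem.Set.contains
        ((PySem.List.enumerate s.toList).foldl
          (fun st ic =>
            (pvByFirst.getD ic.2 []).foldl (fun st p =>
              if PySem.Chars.startswith (s.toList.drop ic.1.toNat) p.1.toList
              then PySem.Set.add st p.2 else st) st) ([] : PySem.Set String)) g)
      = pvMuscleItems.foldl (pvStep s) [] := by
  rw [pv_A_muscles, pvGroupOrder_eq, List.filter_map]
  congr 1
  apply List.filter_congr
  intro grp hgrp
  simp only [Function.comp]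
  rw [Bool.eq_iff_iff, PySem.Set.contains_iff, mem_found, List.any_eq_true]
  constructor
  · rintro ⟨kw, hkw, hin⟩
    rw [pvItems_eq_flat, List.mem_flatMap] at hkw
    rcases hkw with ⟨g', hg', hmem⟩
    rcases List.mem_map.mp hmem with ⟨kw', hkw', heq⟩
    have h2 : g'.1 = grp.1 := congrArg Prod.snd heq
    have hgg := pvFst_inj g' hg' grp hgrp h2
    subst hgg
    refine ⟨kw', hkw', ?_⟩
    have h1 : kw' = kw := congrArg Prod.fst heq
    rw [h1]
    simpa using hin
  · rintro ⟨kw, hkw, hin⟩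
    refine ⟨kw, ?_, by simpa using hin⟩
    rw [pvItems_eq_flat, List.mem_flatMap]
    exact ⟨grp, hgrp, List.mem_map.mpr ⟨kw, hkw, rfl⟩⟩

-- ===== VERDICT (by name: the statement is the Claim_ definition above) =====
theorem get_primary_muscles_spec : Claim_equal_get_primary_muscles := by
  intro tags category _
  show get_primary_muscles tags category = get_primary_muscles_alt tags category
  simp only [get_primary_muscles, get_primary_muscles_alt, pv_B_muscles]
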